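-- pv_equiv track=rewrite | github.com/zdxdsw/GT-CS4235 | Project/Project3/crypto_proj.py | is_waldo
-- ===== SOURCE A (Python) =====
-- def is_waldo(n1, n2):
--     # TODO: Implement this function for Task 4
--     # Public key of yours and Waldo's share a common factor
--     #return False
--     if (n1<n2):
--         r = [n2,n1]
--     else: r = [n1,n2]
--     while (not r[1]==0):
--         tem = r[0] % r[1]
--         r[0] = r[1]
--         r[1] = tem
--     result = (not r[0] == 1)
--
--     return result
-- ===== SOURCE B (Python) =====
-- def is_waldo(n1, n2):
--     a, b = (n1, n2) if n1 >= n2 else (n2, n1)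
--
--     def g(a, b):
--         return a if b == 0 else g(b, a % b)
--
--     return g(a, b) != 1
-- ===== Notes on version B (the rewrite author's own statement) =====
-- stated objective: idiomatic
-- what changed: The larger-first iterative Euclidean while-loop over a mutable two-element list is replaced by a recursive gcd helper g(a,b)=a if b==0 else g(b,a%b) on plain variables; same gcd algorithm, different decomposition (iterative list mutation vs recursion).
import Mathlib
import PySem

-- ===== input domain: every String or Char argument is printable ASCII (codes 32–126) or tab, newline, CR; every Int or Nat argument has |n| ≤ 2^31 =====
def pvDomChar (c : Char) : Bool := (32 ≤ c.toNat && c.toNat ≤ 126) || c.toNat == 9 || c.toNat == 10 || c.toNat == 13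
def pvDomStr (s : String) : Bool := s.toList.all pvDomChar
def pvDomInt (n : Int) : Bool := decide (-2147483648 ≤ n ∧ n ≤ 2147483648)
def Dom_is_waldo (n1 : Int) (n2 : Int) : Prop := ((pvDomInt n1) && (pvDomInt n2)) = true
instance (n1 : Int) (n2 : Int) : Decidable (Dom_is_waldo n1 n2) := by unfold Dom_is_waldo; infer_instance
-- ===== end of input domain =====

-- B replaces the mutable-list iterative Euclidean loop by a recursive gcd helper: same algorithm, different decomposition.


-- ===== PORT A =====
theorem pv_mod_natAbs_lt (a b : Int) (hb : ¬ b = 0) : (PySem.Int.mod a b).natAbs < b.natAbs := by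
  rcases lt_trichotomy b 0 with h | h | h
  · have := PySem.Int.mod_neg_bounds a h
    omega
  · exact absurd h hb
  · have h1 := PySem.Int.mod_nonneg a h
    have h2 := PySem.Int.mod_lt a h
    omega

-- while (not r[1]==0): tem = r[0] % r[1]; r[0] = r[1]; r[1] = tem
def is_waldo_while (r0 : Int) (r1 : Int) : Int × Int :=
  if h : r1 = 0 then (r0, r1)
  else
    let tem := PySem.Int.mod r0 r1
    is_waldo_while r1 tem
termination_by r1.natAbs
decreasing_by exact pv_mod_natAbs_lt r0 r1 h

def is_waldo (n1 : Int) (n2 : Int) : Bool :=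
  let r : Int × Int := if n1 < n2 then (n2, n1) else (n1, n2)
  let r' := is_waldo_while r.1 r.2
  let result := !(r'.1 == 1)
  result

-- ===== PORT B =====
-- g(a, b) = a if b == 0 else g(b, a % b)
def is_waldo_g (a : Int) (b : Int) : Int :=
  if h : b = 0 then a else is_waldo_g b (PySem.Int.mod a b)
termination_by b.natAbs
decreasing_by exact pv_mod_natAbs_lt a b h

def is_waldo_alt (n1 : Int) (n2 : Int) : Bool :=
  let ab : Int × Int := if n1 ≥ n2 then (n1, n2) else (n2, n1)
  is_waldo_g ab.1 ab.2 != 1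

-- ===== PRECONDITION & SPEC =====
def Spec_is_waldo (n1 : Int) (n2 : Int) (out : Bool) : Prop := out = is_waldo_alt n1 n2
instance (n1 : Int) (n2 : Int) (out : Bool) : Decidable (Spec_is_waldo n1 n2 out) := by unfold Spec_is_waldo; infer_instance

-- ===== CLAIM (what is proved, stated in full; the proofs are below) =====
def Claim_equal_is_waldo : Prop := ∀ (n1 : Int) (n2 : Int), Dom_is_waldo n1 n2 → Spec_is_waldo n1 n2 (is_waldo n1 n2)

-- ===== LEMMAS AND PROOFS =====

theorem is_waldo_while_fst (a b : Int) : (is_waldo_while a b).1 = is_waldo_g a b := by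
  fun_induction is_waldo_while a b
  case case1 r0 => simp [is_waldo_g]
  case case2 r0 r1 h tem ih => rw [is_waldo_g, dif_neg h]; exact ih

-- ===== VERDICT (by name: the statement is the Claim_ definition above) =====
theorem is_waldo_spec : Claim_equal_is_waldo := by
  intro n1 n2 _
  unfold Spec_is_waldo is_waldo is_waldo_alt
  simp only [is_waldo_while_fst]
  split_ifs with h1 h2 h2
  · omega
  · simp [bne]
  · simp [bne]
  · omega
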